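-- pv_equiv track=rewrite | github.com/buglenka/python-exercises | SongsPairs.py | numPairsDivisibleBy60_1
-- ===== SOURCE A (Python) =====
-- from typing import List
--
-- DIVISOR = 60
--
-- def numPairsDivisibleBy60_1(time: List[int]) -> int:
--     pairs = set()
--
--     for i in range(len(time)):
--         for j in range(i+1, len(time)):
--             if ((time[i] + time[j]) % DIVISOR == 0):
--                 p = (i, j)
--                 if p not in pairs:
--                     pairs.add(p)
--
--     return len(pairs)
-- ===== SOURCE B (Python) =====
-- from typing import List
--
-- DIVISOR = 60
--
-- def numPairsDivisibleBy60_1(time: List[int]) -> int: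
--     cnt = [0] * DIVISOR
--     ans = 0
--     for t in time:
--         ans += cnt[(-t) % DIVISOR]
--         cnt[t % DIVISOR] += 1
--     return ans
-- ===== Notes on version B (the rewrite author's own statement) =====
-- stated objective: faster
-- what changed: Replaced the O(n^2) nested index loop with a set of index pairs by a single pass that keeps a 60-slot remainder counter and adds, for each song, the number of earlier songs with the complementary remainder mod 60.
import Mathlib
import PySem

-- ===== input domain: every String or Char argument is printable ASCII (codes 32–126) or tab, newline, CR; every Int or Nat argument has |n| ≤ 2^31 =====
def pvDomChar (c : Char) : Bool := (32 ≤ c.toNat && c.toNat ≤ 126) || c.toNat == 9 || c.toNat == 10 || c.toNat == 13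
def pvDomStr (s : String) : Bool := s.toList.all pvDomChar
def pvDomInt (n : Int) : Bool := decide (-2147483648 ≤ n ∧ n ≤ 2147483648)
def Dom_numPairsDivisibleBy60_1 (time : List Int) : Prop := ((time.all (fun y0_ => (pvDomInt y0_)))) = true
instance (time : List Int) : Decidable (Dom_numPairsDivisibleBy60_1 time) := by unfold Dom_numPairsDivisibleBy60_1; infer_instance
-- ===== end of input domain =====

-- B replaces A's O(n^2) nested index loop (collecting index pairs in a set) by one pass
-- over the list with a 60-slot remainder counter; a timing run measures the speed claim.


-- ===== PORT A =====
-- time[i] / time[j] are ported with pyGetD: the indices come from range(len(time)),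
-- so they are always in range and Python never raises there.
def numPairsDivisibleBy60_1 (time : List Int) : Int :=
  let n : Int := (time.length : Int)
  let pairs : PySem.Set (Int × Int) :=
    (PySem.List.pyRange 0 n 1).foldl (fun pairs i =>
      (PySem.List.pyRange (i + 1) n 1).foldl (fun pairs j =>
        if PySem.Int.mod (PySem.List.pyGetD time i 0 + PySem.List.pyGetD time j 0) 60 == 0 then
          if PySem.Set.contains pairs (i, j) = false then PySem.Set.add pairs (i, j) else pairs
        else pairs) pairs) PySem.Set.empty
  PySem.Set.len pairs

-- ===== PORT B =====
-- cnt[(-t) % 60] and cnt[t % 60] are ported with pyGetD/pySetD: with divisor 60 the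
-- index is always in [0, 60), so Python never raises there.
def numPairsDivisibleBy60_1_alt (time : List Int) : Int :=
  (time.foldl (fun (s : List Int × Int) t =>
      let ans := s.2 + PySem.List.pyGetD s.1 (PySem.Int.mod (-t) 60) 0
      let cnt := PySem.List.pySetD s.1 (PySem.Int.mod t 60)
                   (PySem.List.pyGetD s.1 (PySem.Int.mod t 60) 0 + 1)
      (cnt, ans)) (List.replicate 60 0, 0)).2

-- ===== PRECONDITION & SPEC =====
def Spec_numPairsDivisibleBy60_1 (time : List Int) (out : Int) : Prop := out = numPairsDivisibleBy60_1_alt time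
instance (time : List Int) (out : Int) : Decidable (Spec_numPairsDivisibleBy60_1 time out) := by unfold Spec_numPairsDivisibleBy60_1; infer_instance

-- ===== CLAIM (what is proved, stated in full; the proofs are below) =====
def Claim_equal_numPairsDivisibleBy60_1 : Prop := ∀ (time : List Int), Dom_numPairsDivisibleBy60_1 time → Spec_numPairsDivisibleBy60_1 time (numPairsDivisibleBy60_1 time)

-- ===== LEMMAS AND PROOFS =====

-- Common reference value: for each element, the number of partners further right
-- whose sum with it is divisible by 60.
def pvSumA : List Int → Nat
  | [] => 0
  | t :: l => l.countP (fun x => decide ((60 : Int) ∣ t + x)) + pvSumA l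

-- ---- B side: the 60-slot counter of remainders of a processed prefix q ----
def cntL (q : List Int) : List Int :=
  (List.range 60).map (fun (r : Nat) => (q.countP (fun x => PySem.Int.mod x 60 == (r : Int)) : Int))

theorem length_cntL (q : List Int) : (cntL q).length = 60 := by simp [cntL]

theorem getElem_cntL (q : List Int) (k : Nat) (hk : k < 60) :
    (cntL q)[k]'(by rw [length_cntL]; exact hk)
      = (q.countP (fun x => PySem.Int.mod x 60 == (k : Int)) : Int) := by
  simp only [cntL]
  rw [List.getElem_map, List.getElem_range]

theorem cntL_nil : cntL [] = List.replicate 60 0 := by simp [cntL]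

theorem getD_cntL (q : List Int) (r : Int) (h0 : 0 ≤ r) (h1 : r < 60) :
    PySem.List.pyGetD (cntL q) r 0 = (q.countP (fun x => PySem.Int.mod x 60 == r) : Int) := by
  have ht : r.toNat < 60 := by omega
  rw [PySem.List.pyGetD_of_nonneg _ _ h0,
      List.getD_eq_getElem _ _ (by rw [length_cntL]; exact ht), getElem_cntL _ _ ht]
  have : ((r.toNat : Int)) = r := by omega
  rw [this]

theorem setD_cntL (q : List Int) (t : Int) :
    PySem.List.pySetD (cntL q) (PySem.Int.mod t 60)
      (PySem.List.pyGetD (cntL q) (PySem.Int.mod t 60) 0 + 1) = cntL (q ++ [t]) := by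
  have h0 : 0 ≤ PySem.Int.mod t 60 := PySem.Int.mod_nonneg t (by norm_num)
  have h1 : PySem.Int.mod t 60 < 60 := PySem.Int.mod_lt t (by norm_num)
  rw [PySem.List.pySetD_of_nonneg _ _ h0, getD_cntL _ _ h0 h1]
  apply List.ext_getElem
  · rw [List.length_set, length_cntL, length_cntL]
  · intro k hk hk'
    have hk60 : k < 60 := by rwa [length_cntL] at hk'
    rw [List.getElem_set, getElem_cntL (q ++ [t]) _ hk60]
    have hsplit : (q ++ [t]).countP (fun x => PySem.Int.mod x 60 == (k : Int))
        = q.countP (fun x => PySem.Int.mod x 60 == (k : Int))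
          + if PySem.Int.mod t 60 = (k : Int) then 1 else 0 := by
      rw [List.countP_append]
      simp [List.countP_cons]
    rw [hsplit]
    split_ifs with he hmod hmod
    · have : PySem.Int.mod t 60 = (k : Int) := by omega
      rw [this]; push_cast; ring
    · exfalso; apply hmod; omega
    · exfalso; apply he; omega
    · rw [getElem_cntL _ _ hk60]; push_cast; ring

-- cross pairs: partners of each element of l among the already-processed prefix q
def crossN (q l : List Int) : Nat :=
  (l.map (fun t => q.countP (fun x => decide ((60 : Int) ∣ x + t)))).sum

theorem crossN_cons (q : List Int) (t : Int) (l : List Int) :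
    crossN q (t :: l) = q.countP (fun x => decide ((60 : Int) ∣ x + t)) + crossN q l := by
  simp [crossN]

theorem crossN_nil (l : List Int) : crossN [] l = 0 := by simp [crossN]

theorem mod_eq_iff_dvd (x t : Int) :
    (PySem.Int.mod x 60 == PySem.Int.mod (-t) 60) = decide ((60 : Int) ∣ x + t) := by
  rw [PySem.Int.mod_eq_emod_of_pos (by norm_num), PySem.Int.mod_eq_emod_of_pos (by norm_num)]
  show decide (x % 60 = (-t) % 60) = decide ((60 : Int) ∣ x + t)
  rw [decide_eq_decide]
  omega

theorem crossN_append (q l : List Int) (t : Int) :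
    crossN (q ++ [t]) l = crossN q l + l.countP (fun x => decide ((60 : Int) ∣ t + x)) := by
  induction l with
  | nil => rfl
  | cons t' l ih =>
    rw [crossN_cons, crossN_cons, List.countP_cons, List.countP_append, ih]
    have h1 : [t].countP (fun x => decide ((60 : Int) ∣ x + t')) = if (60 : Int) ∣ t + t' then 1 else 0 := by
      simp [List.countP_cons, Int.add_comm]
    rw [h1]
    rcases Decidable.em ((60 : Int) ∣ t + t') with h | h <;> simp [h]    <;> omega

theorem foldB (l : List Int) : ∀ (q : List Int) (z : Int),
    (l.foldl (fun (s : List Int × Int) t =>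
      let ans := s.2 + PySem.List.pyGetD s.1 (PySem.Int.mod (-t) 60) 0
      let cnt := PySem.List.pySetD s.1 (PySem.Int.mod t 60)
                   (PySem.List.pyGetD s.1 (PySem.Int.mod t 60) 0 + 1)
      (cnt, ans)) (cntL q, z)).2 = z + (crossN q l : Int) + (pvSumA l : Int) := by
  induction l with
  | nil => intro q z; simp [crossN, pvSumA]
  | cons t l ih =>
    intro q z
    rw [List.foldl_cons]
    have hstep :
        (let ans := (cntL q, z).2 + PySem.List.pyGetD (cntL q, z).1 (PySem.Int.mod (-t) 60) 0;
         let cnt := PySem.List.pySetD (cntL q, z).1 (PySem.Int.mod t 60)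
                      (PySem.List.pyGetD (cntL q, z).1 (PySem.Int.mod t 60) 0 + 1);
         ((cnt, ans) : List Int × Int))
        = (cntL (q ++ [t]), z + (q.countP (fun x => decide ((60 : Int) ∣ x + t)) : Int)) := by
      show (PySem.List.pySetD (cntL q) (PySem.Int.mod t 60)
              (PySem.List.pyGetD (cntL q) (PySem.Int.mod t 60) 0 + 1),
            z + PySem.List.pyGetD (cntL q) (PySem.Int.mod (-t) 60) 0)
          = _
      rw [setD_cntL]
      have h0 : 0 ≤ PySem.Int.mod (-t) 60 := PySem.Int.mod_nonneg _ (by norm_num)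
      have h1 : PySem.Int.mod (-t) 60 < 60 := PySem.Int.mod_lt _ (by norm_num)
      rw [getD_cntL _ _ h0 h1]
      have : q.countP (fun x => PySem.Int.mod x 60 == PySem.Int.mod (-t) 60)
           = q.countP (fun x => decide ((60 : Int) ∣ x + t)) := by
        apply List.countP_congr; intro x _; rw [mod_eq_iff_dvd]
      rw [this]
    rw [hstep, ih, crossN_append, pvSumA, crossN_cons]
    have hc : l.countP (fun x => decide ((60 : Int) ∣ t + x))
        = l.countP (fun x => decide ((60 : Int) ∣ x + t)) := by
      apply List.countP_congr; intro x _; simp [Int.add_comm]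
    rw [hc]
    push_cast
    ring

-- ---- A side: the nested loop builds exactly the list of qualifying index pairs ----
def condA (time : List Int) (i j : Int) : Bool :=
  PySem.Int.mod (PySem.List.pyGetD time i 0 + PySem.List.pyGetD time j 0) 60 == 0

theorem innerFold (time : List Int) (i : Int) :
    ∀ (jl : List Int) (s : List (Int × Int)), jl.Nodup → (∀ j ∈ jl, (i, j) ∉ s) →
    jl.foldl (fun s j =>
      if condA time i j then
        (if PySem.Set.contains s (i, j) = false then PySem.Set.add s (i, j) else s)
      else s) s
    = s ++ (jl.filter (condA time i)).map (fun j => (i, j)) := by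
  intro jl
  induction jl with
  | nil => intro s _ _; simp
  | cons j jl ih =>
    intro s hnd hni
    rw [List.foldl_cons]
    have hmem : (i, j) ∉ s := hni j (by simp)
    have hc : PySem.Set.contains s (i, j) = false := by
      simp [PySem.Set.contains]
      exact hmem
    by_cases hcond : condA time i j
    · rw [if_pos hcond, hc, if_pos rfl]
      have hadd : PySem.Set.add s (i, j) = s ++ [(i, j)] := by
        simp [PySem.Set.add, PySem.Set.contains, hmem]
      rw [hadd, ih _ (by exact (List.nodup_cons.mp hnd).2) ?fresh]
      · simp [hcond]
      case fresh =>
        intro j' hj'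
        simp only [List.mem_append, List.mem_singleton]
        rintro (h | h)
        · exact hni j' (by simp [hj']) h
        · have : j' = j := by simpa using congrArg Prod.snd h
          exact (List.nodup_cons.mp hnd).1 (this ▸ hj')
    · rw [if_neg hcond, ih _ (List.nodup_cons.mp hnd).2 (fun j' hj' => hni j' (by simp [hj']))]
      simp [hcond]

theorem outerFold (time : List Int) (n : Int) :
    ∀ (il : List Int) (s : List (Int × Int)), il.Pairwise (· < ·) →
    (∀ p ∈ s, ∀ i ∈ il, p.1 < i) →
    il.foldl (fun s i =>
      (PySem.List.pyRange (i + 1) n 1).foldl (fun s j =>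
        if condA time i j then
          (if PySem.Set.contains s (i, j) = false then PySem.Set.add s (i, j) else s)
        else s) s) s
    = s ++ il.flatMap (fun i =>
        ((PySem.List.pyRange (i + 1) n 1).filter (condA time i)).map (fun j => (i, j))) := by
  intro il
  induction il with
  | nil => intro s _ _; simp
  | cons i il ih =>
    intro s hpw hs
    rw [List.foldl_cons,
        innerFold time i _ _ (PySem.List.nodup_pyRange_one _ _)
          (fun j _ hmem => by
            have := hs _ hmem i (by simp)
            simp at this),
        ih _ (List.pairwise_cons.mp hpw).2 ?hyp]
    · simp [List.flatMap_cons]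
    case hyp =>
      intro p hp i' hi'
      rcases List.mem_append.mp hp with h | h
      · exact hs p h i' (by simp [hi'])
      · rcases List.mem_map.mp h with ⟨j, _, rfl⟩
        exact (List.pairwise_cons.mp hpw).1 i' hi'

theorem countA_drop (time : List Int) (k : Nat) (hk : k < time.length) :
    (PySem.List.pyRange ((k : Int) + 1) (time.length : Int) 1).countP (condA time (k : Int))
      = (time.drop (k + 1)).countP (fun x => decide ((60 : Int) ∣ time[k] + x)) := by
  have hmap : (PySem.List.pyRange ((k : Int) + 1) (time.length : Int) 1).map
      (fun j => PySem.List.pyGetD time j 0) = time.drop (k + 1) := by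
    have := PySem.List.map_pyGetD_pyRange time 0 (a := (k : Int) + 1) (by positivity)
    rw [PySem.List.len_eq] at this
    simpa using this
  have h1 : (PySem.List.pyRange ((k : Int) + 1) (time.length : Int) 1).countP (condA time (k : Int))
      = List.countP (fun x => PySem.Int.mod (PySem.List.pyGetD time (k : Int) 0 + x) 60 == 0)
          ((PySem.List.pyRange ((k : Int) + 1) (time.length : Int) 1).map
            (fun j => PySem.List.pyGetD time j 0)) := by
    rw [List.countP_map]
    rfl
  rw [h1, hmap]
  apply List.countP_congr
  intro x _
  rw [PySem.List.pyGetD_natCast, List.getD_eq_getElem _ _ hk]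
  simp [pysem]

theorem sumDrop (time : List Int) : ∀ (m k : Nat), k + m = time.length →
    (((PySem.List.pyRange (k : Int) (time.length : Int) 1).map (fun i =>
       ((PySem.List.pyRange (i + 1) (time.length : Int) 1).filter (condA time i)).length)).sum)
      = pvSumA (time.drop k) := by
  intro m
  induction m with
  | zero =>
    intro k hk
    rw [PySem.List.pyRange_one_eq_nil (by omega)]
    simp [show k = time.length by omega, pvSumA]
  | succ m ih =>
    intro k hk
    have hlt : (k : Int) < (time.length : Int) := by omega
    rw [PySem.List.pyRange_one_cons hlt, List.map_cons, List.sum_cons]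
    have hrest := ih (k + 1) (by omega)
    rw [show ((k : Int) + 1) = ((k + 1 : Nat) : Int) by push_cast; ring] at *
    rw [hrest, ← List.countP_eq_length_filter,
        show ((k + 1 : Nat) : Int) = (k : Int) + 1 by push_cast; ring,
        countA_drop time k (by omega)]
    rw [← List.getElem_cons_drop (show k < time.length by omega)]
    rfl

theorem B_eq_sumA (time : List Int) : numPairsDivisibleBy60_1_alt time = (pvSumA time : Int) := by
  unfold numPairsDivisibleBy60_1_alt
  rw [← cntL_nil, foldB time [] 0, crossN_nil]
  simp

theorem A_eq_sumA (time : List Int) : numPairsDivisibleBy60_1 time = (pvSumA time : Int) := by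
  unfold numPairsDivisibleBy60_1
  change PySem.Set.len ((PySem.List.pyRange 0 (time.length : Int) 1).foldl (fun s i =>
      (PySem.List.pyRange (i + 1) (time.length : Int) 1).foldl (fun s j =>
        if condA time i j then
          (if PySem.Set.contains s (i, j) = false then PySem.Set.add s (i, j) else s)
        else s) s) PySem.Set.empty) = _
  rw [outerFold time (time.length : Int) (PySem.List.pyRange 0 (time.length : Int) 1)
        PySem.Set.empty (PySem.List.pairwise_lt_pyRange_one _ _)
        (by intro p hp; simp [PySem.Set.empty] at hp)]
  show ((List.nil ++ _).length : Int) = _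
  rw [List.nil_append, List.length_flatMap]
  have h := sumDrop time time.length 0 (by omega)
  simp only [Nat.cast_zero, List.drop_zero] at h
  rw [← h]
  congr 1
  congr 1
  apply List.map_congr_left
  intro i _
  rw [List.length_map]

-- ===== VERDICT (by name: the statement is the Claim_ definition above) =====
theorem numPairsDivisibleBy60_1_spec : Claim_equal_numPairsDivisibleBy60_1 := by
  intro time _
  unfold Spec_numPairsDivisibleBy60_1
  rw [A_eq_sumA, B_eq_sumA]
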